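-- pv_equiv track=rewrite | github.com/alan-tsang/dl_experiment_framework | zero2hero/model/moe/dev.py | get_num_experts_per_layer
-- ===== SOURCE A (Python) =====
-- def get_num_experts_per_layer(num_experts: list , num_layers: int, expert_interval: int, offset: int = 0) -> list:
--     num_experts = [int(x) for x in num_experts.split()]
--     assert len(num_experts) == 1 or len(num_experts) == num_layers // expert_interval, \
--         'num_experts must be either a single value or a list of the same length as the number of MoE layers'
--     if len(num_experts) == 1:
--         num_experts = num_experts * (num_layers // expert_interval)
--     experts_per_layer = []
--     for i in range(num_layers):
--         layer_num = i + 1 + offset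
--         n_e = num_experts[(layer_num-1) // expert_interval] if layer_num % expert_interval == 0 else 1
--         experts_per_layer.append(n_e)
--     return experts_per_layer
-- ===== SOURCE B (Python) =====
-- def get_num_experts_per_layer(num_experts: list, num_layers: int, expert_interval: int, offset: int = 0) -> list:
--     counts = [int(x) for x in num_experts.split()]
--     assert len(counts) == 1 or len(counts) == num_layers // expert_interval, \
--         'num_experts must be either a single value or a list of the same length as the number of MoE layers'
--     if len(counts) == 1:
--         counts = counts * (num_layers // expert_interval)
--     # walk the MoE positions block by block: a run of ones, then the expert count,
--     # then the next run, finally trim the overshoot of the last block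
--     first = (-(1 + offset)) % expert_interval   # first MoE layer index
--     out = [1] * min(first, num_layers)
--     pos = first
--     while pos < num_layers:
--         out.append(counts[(pos + offset) // expert_interval])
--         out.extend([1] * (expert_interval - 1))
--         pos += expert_interval
--     return out[:num_layers]
-- ===== Notes on version B (the rewrite author's own statement) =====
-- stated objective: alternative
-- what changed: Instead of testing every layer with a modulo branch, B emits the list block by block: runs of ones interleaved with the expert count at each MoE position (stepping by expert_interval from the arithmetically computed first MoE index), then trims the last block's overshoot.
-- outside the precondition, e.g. on get_num_experts_per_layer('4', 1, -2, 0): A returns [1], B raises IndexError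
import Mathlib
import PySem

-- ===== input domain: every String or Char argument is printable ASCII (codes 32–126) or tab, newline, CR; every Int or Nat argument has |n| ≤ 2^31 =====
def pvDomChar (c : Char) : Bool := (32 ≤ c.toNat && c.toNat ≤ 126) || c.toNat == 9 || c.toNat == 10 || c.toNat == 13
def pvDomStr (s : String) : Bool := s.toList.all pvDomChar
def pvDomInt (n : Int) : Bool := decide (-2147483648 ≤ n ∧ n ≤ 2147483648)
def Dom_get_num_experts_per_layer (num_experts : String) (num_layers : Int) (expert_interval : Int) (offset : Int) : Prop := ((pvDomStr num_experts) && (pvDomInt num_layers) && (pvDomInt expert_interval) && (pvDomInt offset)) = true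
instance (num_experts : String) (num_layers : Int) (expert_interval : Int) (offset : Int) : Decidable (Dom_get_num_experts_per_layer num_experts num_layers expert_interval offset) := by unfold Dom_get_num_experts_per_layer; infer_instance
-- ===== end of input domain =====

-- B replaces A's per-layer modulo test by a block-by-block construction: runs of ones
-- interleaved with the expert count at each MoE position, trimming the last block's overshoot.

-- ===== PORT A =====
def get_num_experts_per_layer (num_experts : String) (num_layers : Int) (expert_interval : Int) (offset : Int) : List Int :=
  -- int(x) with ValueError, and the assert, are excluded by Pre_ (ofStr? defaulted under isSome)
  let ne0 : List Int := (PySem.Str.split₀ num_experts).map (fun x => (PySem.Int.ofStr? x).getD 0)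
  let ne : List Int :=
    if ne0.length = 1 then PySem.List.pyRepeat ne0 (PySem.Int.floordiv num_layers expert_interval) else ne0
  (PySem.List.pyRange 0 num_layers 1).foldl
    (fun experts_per_layer i =>
      let layer_num := i + 1 + offset
      let n_e :=
        if PySem.Int.mod layer_num expert_interval = 0 then
          -- IndexError excluded by Pre_ (InRange); negative in-range indices handled by pyGetD
          PySem.List.pyGetD ne (PySem.Int.floordiv (layer_num - 1) expert_interval) 0
        else 1
      experts_per_layer ++ [n_e]) []

-- ===== PORT B =====
-- the 'while pos < num_layers' loop of Source B; fuel num_layers.toNat bounds the iteration count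
-- (enough under Pre_: with 0 < expert_interval the loop runs at most num_layers times)
def pvBlockWalk (counts : List Int) (expert_interval : Int) (offset : Int) (num_layers : Int) :
    Nat → Int → List Int → List Int
  | 0, _, out => out
  | fuel + 1, pos, out =>
    if pos < num_layers then
      pvBlockWalk counts expert_interval offset num_layers fuel (pos + expert_interval)
        ((out ++ [PySem.List.pyGetD counts (PySem.Int.floordiv (pos + offset) expert_interval) 0])
          ++ PySem.List.pyRepeat [1] (expert_interval - 1))
    else out

def get_num_experts_per_layer_alt (num_experts : String) (num_layers : Int) (expert_interval : Int) (offset : Int) : List Int :=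
  let counts0 : List Int := (PySem.Str.split₀ num_experts).map (fun x => (PySem.Int.ofStr? x).getD 0)
  let counts : List Int :=
    if counts0.length = 1 then PySem.List.pyRepeat counts0 (PySem.Int.floordiv num_layers expert_interval) else counts0
  let first := PySem.Int.mod (-(1 + offset)) expert_interval
  let out := pvBlockWalk counts expert_interval offset num_layers num_layers.toNat first
    (PySem.List.pyRepeat [1] (min first num_layers))
  PySem.List.slice out none (some num_layers)

-- ===== PRECONDITION & SPEC =====
-- Pre_ excludes inputs where one of the Pythons raises (ValueError from int(x), the failing assert,
-- ZeroDivisionError at expert_interval = 0, IndexError on an out-of-range expert index) and restricts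
-- to the function's natural domain 0 < expert_interval, except for the corner where a negative
-- interval leaves no layer to fill (num_layers ≤ first, both return []); for a negative interval
-- with layers remaining B's block walk raises IndexError while A sometimes returns (cited).
def Pre_get_num_experts_per_layer (num_experts : String) (num_layers : Int) (expert_interval : Int) (offset : Int) : Prop :=
  let toks := PySem.Str.split₀ num_experts
  let L : Nat := if toks.length = 1 then (PySem.Int.floordiv num_layers expert_interval).toNat else toks.length
  let first := PySem.Int.mod (-(1 + offset)) expert_interval
  (0 < expert_interval ∨ (expert_interval < 0 ∧ num_layers ≤ first)) ∧
  (∀ t ∈ toks, (PySem.Int.ofStr? t).isSome = true) ∧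
  (toks.length = 1 ∨ (toks.length : Int) = PySem.Int.floordiv num_layers expert_interval) ∧
  -- the MoE positions are first, first+interval, …; their expert indices form the contiguous
  -- interval [q, q + (num_layers-1-first)//interval], so checking its two ends is 'no IndexError'
  (first < num_layers →
    PySem.Raise.InRange L (PySem.Int.floordiv (first + offset) expert_interval) ∧
    PySem.Raise.InRange L (PySem.Int.floordiv (first + offset) expert_interval +
      PySem.Int.floordiv (num_layers - 1 - first) expert_interval))
instance (num_experts : String) (num_layers : Int) (expert_interval : Int) (offset : Int) : Decidable (Pre_get_num_experts_per_layer num_experts num_layers expert_interval offset) := by unfold Pre_get_num_experts_per_layer; infer_instance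

def pvWitness_get_num_experts_per_layer : String × Int × Int × Int := ("2 3", 4, 2, 0)

def Spec_get_num_experts_per_layer (num_experts : String) (num_layers : Int) (expert_interval : Int) (offset : Int) (out : List Int) : Prop := out = get_num_experts_per_layer_alt num_experts num_layers expert_interval offset
instance (num_experts : String) (num_layers : Int) (expert_interval : Int) (offset : Int) (out : List Int) : Decidable (Spec_get_num_experts_per_layer num_experts num_layers expert_interval offset out) := by unfold Spec_get_num_experts_per_layer; infer_instance

-- ===== CLAIM (what is proved, stated in full; the proofs are below) =====
def Claim_equal_get_num_experts_per_layer : Prop := ∀ (num_experts : String) (num_layers : Int) (expert_interval : Int) (offset : Int), Dom_get_num_experts_per_layer num_experts num_layers expert_interval offset → Pre_get_num_experts_per_layer num_experts num_layers expert_interval offset → Spec_get_num_experts_per_layer num_experts num_layers expert_interval offset (get_num_experts_per_layer num_experts num_layers expert_interval offset)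

-- ===== LEMMAS AND PROOFS =====

-- the accumulator of the block walk is only ever appended to
lemma pvBlockWalk_acc (counts : List Int) (E off nl : Int) (f : Nat) (p : Int) (out : List Int) :
    pvBlockWalk counts E off nl f p out = out ++ pvBlockWalk counts E off nl f p [] := by
  induction f generalizing p out with
  | zero => simp [pvBlockWalk]
  | succ f ih =>
    by_cases h : p < nl
    · simp only [pvBlockWalk, if_pos h]
      rw [ih (p + E)
          ((out ++ [PySem.List.pyGetD counts (PySem.Int.floordiv (p + off) E) 0])
            ++ PySem.List.pyRepeat [1] (E - 1)),
        ih (p + E)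
          ((([] : List Int) ++ [PySem.List.pyGetD counts (PySem.Int.floordiv (p + off) E) 0])
            ++ PySem.List.pyRepeat [1] (E - 1))]
      simp
    · simp only [pvBlockWalk, if_neg h]
      simp

-- below the first MoE position there is no MoE position
lemma pvNoHit (E off i : Int) (hE : 0 < E) (h0 : 0 ≤ i)
    (hi : i < PySem.Int.mod (-(1 + off)) E) : PySem.Int.mod (i + 1 + off) E ≠ 0 := by
  intro h
  rw [PySem.Int.mod_eq_zero_iff_dvd] at h
  have hfirst := PySem.Int.floordiv_mul_add_mod (-(1 + off)) E
  have hlt := PySem.Int.mod_lt (-(1 + off)) hE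
  have hd : E ∣ (PySem.Int.mod (-(1 + off)) E - i) := by
    have h2 : E ∣ (PySem.Int.mod (-(1 + off)) E + 1 + off) :=
      ⟨-(PySem.Int.floordiv (-(1 + off)) E), by linarith⟩
    have := dvd_sub h2 h
    simpa [show PySem.Int.mod (-(1 + off)) E + 1 + off - (i + 1 + off) =
      PySem.Int.mod (-(1 + off)) E - i by ring] using this
  have := Int.le_of_dvd (by omega) hd
  omega

-- the first MoE position is a MoE position
lemma pvFirstHit (E off : Int) :
    PySem.Int.mod (PySem.Int.mod (-(1 + off)) E + 1 + off) E = 0 := by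
  rw [PySem.Int.mod_eq_zero_iff_dvd]
  have h := PySem.Int.floordiv_mul_add_mod (-(1 + off)) E
  exact ⟨-(PySem.Int.floordiv (-(1 + off)) E), by linarith⟩

-- within one block [p, m) (m ≤ p + E) only the leading position p is a MoE position
lemma pvBlock_map (counts : List Int) (E off p m : Int)
    (hp : PySem.Int.mod (p + 1 + off) E = 0) (hpm : p < m) (hme : m ≤ p + E) :
    (PySem.List.pyRange p m 1).map
        (fun i => if PySem.Int.mod (i + 1 + off) E = 0 then
          PySem.List.pyGetD counts (PySem.Int.floordiv (i + off) E) 0 else 1) =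
      PySem.List.pyGetD counts (PySem.Int.floordiv (p + off) E) 0 :: List.replicate (m - p - 1).toNat 1 := by
  rw [PySem.List.pyRange_one_cons hpm, List.map_cons, if_pos hp]
  congr 1
  refine List.eq_replicate_iff.mpr ⟨by rw [List.length_map, PySem.List.length_pyRange_one]; omega, ?_⟩
  intro b hb
  simp only [List.mem_map] at hb
  obtain ⟨i, hi, rfl⟩ := hb
  rw [PySem.List.mem_pyRange_one] at hi
  rw [if_neg]
  intro hhit
  rw [PySem.Int.mod_eq_zero_iff_dvd] at hp hhit
  have hd : E ∣ (i - p) := by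
    have := dvd_sub hhit hp
    simpa [show i + 1 + off - (p + 1 + off) = i - p by ring] using this
  have := Int.le_of_dvd (by omega) hd
  omega

-- the trimmed block walk from a MoE position p is A's per-layer map from p on
lemma pvBlockWalk_take (counts : List Int) (E off nl : Int) (hE : 0 < E) :
    ∀ (f : Nat) (p : Int), 0 ≤ p → PySem.Int.mod (p + 1 + off) E = 0 → nl ≤ p + f * E →
    List.take (nl - p).toNat (pvBlockWalk counts E off nl f p []) =
      (PySem.List.pyRange p nl 1).map
        (fun i => if PySem.Int.mod (i + 1 + off) E = 0 then
          PySem.List.pyGetD counts (PySem.Int.floordiv (i + off) E) 0 else 1) := by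
  intro f
  induction f with
  | zero =>
    intro p _ _ hnl
    simp only [Nat.cast_zero, zero_mul, add_zero] at hnl
    rw [PySem.List.pyRange_one_eq_nil hnl]
    simp [pvBlockWalk]
  | succ f ih =>
    intro p hp0 hhit hnl
    by_cases h : p < nl
    · simp only [pvBlockWalk, if_pos h]
      rw [pvBlockWalk_acc, List.nil_append, PySem.List.pyRepeat_singleton,
        List.singleton_append]
      by_cases h2 : nl ≤ p + E
      · -- the final (possibly truncated) block
        have hstop : pvBlockWalk counts E off nl f (p + E) [] = [] := by
          cases f with
          | zero => simp [pvBlockWalk]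
          | succ f => simp only [pvBlockWalk, if_neg (by omega : ¬ p + E < nl)]
        rw [hstop, List.append_nil]
        have hnp : (nl - p).toNat = (nl - p - 1).toNat + 1 := by omega
        rw [hnp, List.take_succ_cons, List.take_replicate,
          pvBlock_map counts E off p nl hhit h h2]
        congr 2
        omega
      · -- a full block followed by the rest of the walk
        have hlen : ((PySem.List.pyGetD counts (PySem.Int.floordiv (p + off) E) 0) ::
            List.replicate (E - 1).toNat 1).length = E.toNat := by
          simp; omega
        rw [List.take_append, List.take_of_length_le (by rw [hlen]; omega), hlen]
        have hrest : (nl - p).toNat - E.toNat = (nl - (p + E)).toNat := by omega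
        have hhit' : PySem.Int.mod (p + E + 1 + off) E = 0 := by
          rw [PySem.Int.mod_eq_zero_iff_dvd] at hhit ⊢
          have := dvd_add hhit (dvd_refl E)
          simpa [show p + 1 + off + E = p + E + 1 + off by ring] using this
        have hnl' : nl ≤ p + E + (f : Int) * E := by
          have h5 : ((f + 1 : Nat) : Int) * E = (f : Int) * E + E := by push_cast; ring
          rw [h5] at hnl
          linarith [hnl]
        rw [hrest, ih (p + E) (by omega) hhit' hnl']
        rw [PySem.List.pyRange_one_append p (p + E) nl (by omega) (by omega), List.map_append]
        rw [pvBlock_map counts E off p (p + E) hhit (by omega) (le_refl _),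
          show p + E - p - 1 = E - 1 from by ring]
    · simp only [pvBlockWalk, if_neg h]
      rw [PySem.List.pyRange_one_eq_nil (by omega)]
      simp

-- ===== VERDICT (by name: the statement is the Claim_ definition above) =====
theorem get_num_experts_per_layer_spec : Claim_equal_get_num_experts_per_layer := by
  intro num_experts num_layers expert_interval offset _hdom hpre
  obtain ⟨hE0, -, -, -⟩ := hpre
  unfold Spec_get_num_experts_per_layer get_num_experts_per_layer get_num_experts_per_layer_alt
  dsimp only
  rw [PySem.List.foldl_append_singleton_eq_map, List.nil_append]
  simp only [show ∀ i : Int, i + 1 + offset - 1 = i + offset from fun i => by ring]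
  set counts : List Int :=
    (if ((PySem.Str.split₀ num_experts).map (fun x => (PySem.Int.ofStr? x).getD 0)).length = 1 then
      PySem.List.pyRepeat ((PySem.Str.split₀ num_experts).map (fun x => (PySem.Int.ofStr? x).getD 0))
        (PySem.Int.floordiv num_layers expert_interval)
     else (PySem.Str.split₀ num_experts).map (fun x => (PySem.Int.ofStr? x).getD 0)) with hc
  set first := PySem.Int.mod (-(1 + offset)) expert_interval with hfirst
  rcases hE0 with hE | ⟨hEneg, hnlf⟩
  case inr =>
    -- negative interval with no layer to fill: both sides are empty
    have hfb := PySem.Int.mod_neg_bounds (-(1 + offset)) hEneg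
    rw [← hfirst] at hfb
    have hnl : num_layers ≤ 0 := by omega
    have hw : pvBlockWalk counts expert_interval offset num_layers num_layers.toNat first
        (PySem.List.pyRepeat [1] (min first num_layers)) = [] := by
      rw [show min first num_layers = num_layers from by omega,
        PySem.List.pyRepeat_singleton, show num_layers.toNat = 0 from by omega]
      simp [pvBlockWalk]
    rw [hw, PySem.List.pyRange_one_eq_nil hnl]
    simp [PySem.List.slice]
  have hf0 : 0 ≤ first := PySem.Int.mod_nonneg _ hE
  have hfE : first < expert_interval := PySem.Int.mod_lt _ hE
  have hhit : PySem.Int.mod (first + 1 + offset) expert_interval = 0 := pvFirstHit _ _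
  by_cases hnl : num_layers ≤ 0
  · -- no layers requested: both sides are empty
    have hmin : min first num_layers = num_layers := by omega
    have hw : pvBlockWalk counts expert_interval offset num_layers num_layers.toNat first
        (PySem.List.pyRepeat [1] (min first num_layers)) = [] := by
      rw [hmin, PySem.List.pyRepeat_singleton, show num_layers.toNat = 0 from by omega]
      simp [pvBlockWalk]
    rw [hw, PySem.List.pyRange_one_eq_nil hnl]
    simp [PySem.List.slice]
  · rw [PySem.List.slice_to _ (by omega)]
    replace hnl : 0 < num_layers := by omega
    by_cases h2 : num_layers ≤ first
    · -- all requested layers sit before the first MoE position: all ones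
      have hmin : min first num_layers = num_layers := by omega
      obtain ⟨f, hf⟩ : ∃ f, num_layers.toNat = f + 1 := ⟨num_layers.toNat - 1, by omega⟩
      have hw : pvBlockWalk counts expert_interval offset num_layers num_layers.toNat first
          (PySem.List.pyRepeat [1] (min first num_layers)) =
          List.replicate num_layers.toNat 1 := by
        rw [hf, hmin, pvBlockWalk, if_neg (by omega : ¬ first < num_layers),
          PySem.List.pyRepeat_singleton, hf]
      rw [hw, List.take_replicate, Nat.min_self]
      refine List.eq_replicate_iff.mpr ⟨by simp [PySem.List.length_pyRange_one], ?_⟩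
      intro b hb
      simp only [List.mem_map] at hb
      obtain ⟨i, hi, rfl⟩ := hb
      rw [PySem.List.mem_pyRange_one] at hi
      rw [if_neg (pvNoHit expert_interval offset i hE hi.1 (by omega))]
    · -- ones up to the first MoE position, then the block walk
      replace h2 : first < num_layers := by omega
      have hmin : min first num_layers = first := by omega
      rw [hmin, pvBlockWalk_acc, PySem.List.pyRepeat_singleton, List.take_append,
        List.take_of_length_le (by simp; omega), List.length_replicate]
      have hrest : num_layers.toNat - first.toNat = (num_layers - first).toNat := by omega
      have hnl' : num_layers ≤ first + (num_layers.toNat : Int) * expert_interval := by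
        have h3 : (num_layers.toNat : Int) = num_layers := by omega
        have h4 : num_layers ≤ num_layers * expert_interval :=
          le_mul_of_one_le_right (by omega) (by omega)
        rw [h3]; omega
      rw [hrest, pvBlockWalk_take counts expert_interval offset num_layers hE
        num_layers.toNat first hf0 hhit hnl']
      rw [PySem.List.pyRange_one_append 0 first num_layers hf0 (by omega), List.map_append]
      congr 1
      refine List.eq_replicate_iff.mpr ⟨by simp [PySem.List.length_pyRange_one], ?_⟩
      intro b hb
      simp only [List.mem_map] at hb
      obtain ⟨i, hi, rfl⟩ := hb
      rw [PySem.List.mem_pyRange_one] at hi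
      rw [if_neg (pvNoHit expert_interval offset i hE hi.1 (by omega))]
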